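-- pv_equiv track=rewrite | github.com/ishangote/Coding-Interviews-Python | Leetcode/Analyze User Website Visit Pattern/analyze_website_patttern.py | analyze_website_pattern
-- ===== SOURCE A (Python) =====
-- from collections import defaultdict
-- from itertools import combinations
--
-- def analyze_website_pattern(username, timestamp, website):
--     packed_tuple = sorted(zip(timestamp, username, website))
--
--     per_user_websites = defaultdict(list)
--     for time, user, web in packed_tuple:
--         per_user_websites[user].append(web)
--
--     three_sequences_count = defaultdict(int)
--     for websites in per_user_websites.values():
--         three_sequences = set(combinations(websites, 3))
--         for ts in three_sequences:
--             three_sequences_count[ts] += 1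
--
--     sorted_three_sequences_count = sorted(three_sequences_count, key = lambda x: (-three_sequences_count[x], x))
--
--     return list(sorted_three_sequences_count[0])
-- ===== SOURCE B (Python) =====
-- def _is_subseq3(pat, seq):
--     i = 0
--     for w in seq:
--         if i < 3 and w == pat[i]:
--             i += 1
--     return i == 3
--
--
-- def analyze_website_pattern(username, timestamp, website):
--     events = sorted(zip(timestamp, username, website))
--
--     visits = {}
--     for _, user, web in events:
--         visits.setdefault(user, []).append(web)
--     seqs = list(visits.values())
--
--     sites = sorted({web for _, _, web in events})
--
--     best_pat, best_cnt = None, 0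
--     for a in sites:
--         for b in sites:
--             for c in sites:
--                 pat = (a, b, c)
--                 cnt = sum(1 for s in seqs if _is_subseq3(pat, s))
--                 if cnt > best_cnt:
--                     best_pat, best_cnt = pat, cnt
--     return list(best_pat)
-- ===== Notes on version B (the rewrite author's own statement) =====
-- stated objective: alternative
-- what changed: Instead of enumerating and deduplicating every user's 3-combinations into a counter and sorting it by (-count, pattern), B scans the lexicographically ordered cube of distinct websites and, for each candidate triple, counts the users whose chronological visit sequence contains it as a subsequence via a greedy pointer test; the in-order scan with strict improvement makes the tie-break implicit.
import Mathlib
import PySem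

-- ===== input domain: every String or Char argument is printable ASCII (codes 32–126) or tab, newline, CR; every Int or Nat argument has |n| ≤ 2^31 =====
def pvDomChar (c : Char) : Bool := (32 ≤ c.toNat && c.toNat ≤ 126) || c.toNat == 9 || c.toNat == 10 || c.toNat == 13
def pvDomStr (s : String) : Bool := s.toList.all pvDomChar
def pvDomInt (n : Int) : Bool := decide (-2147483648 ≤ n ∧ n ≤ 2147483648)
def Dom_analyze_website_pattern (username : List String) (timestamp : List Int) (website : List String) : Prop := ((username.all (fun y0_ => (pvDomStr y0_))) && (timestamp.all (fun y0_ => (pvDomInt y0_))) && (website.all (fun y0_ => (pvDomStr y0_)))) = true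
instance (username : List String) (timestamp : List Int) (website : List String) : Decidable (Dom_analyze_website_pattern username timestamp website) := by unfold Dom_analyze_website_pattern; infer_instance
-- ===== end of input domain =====

-- B never enumerates per-user 3-combinations: it scans the lex-ordered cube of distinct websites
-- and counts, per candidate triple, the users whose chronological sequence contains it as a
-- subsequence (greedy pointer test); return values are proved equal (objective: alternative).

-- ===== PORT A =====
-- Python tuples of length 3 become products; combinations yields length-3 lists, converted to products.
def pvToTriple (l : List String) : String × String × String :=
  match l with
  | [a, b, c] => (a, b, c)
  | _ => ("", "", "")

def analyze_website_pattern (username : List String) (timestamp : List Int) (website : List String) : List String :=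
  let packed_tuple := PySem.List.sorted (timestamp.zip (username.zip website))
      (fun e => toLex (e.1, toLex (e.2.1, e.2.2)))
  let per_user_websites : PySem.Dict String (List String) := packed_tuple.foldl
      (fun d e => d.modify e.2.1 [] (fun l => l ++ [e.2.2])) PySem.Dict.empty
  let three_sequences_count : PySem.Dict (String × String × String) Int :=
    per_user_websites.values.foldl
      (fun d websites =>
        (PySem.Set.ofList ((PySem.List.combinations websites 3).map pvToTriple)).foldl
          (fun d ts => d.modify ts 0 (· + 1)) d)
      PySem.Dict.empty
  match PySem.List.sorted three_sequences_count.keys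
      (fun x => toLex (-(three_sequences_count.getD x 0), toLex (x.1, toLex (x.2.1, x.2.2)))) with
  | [] => []   -- Python raises IndexError here; excluded by Pre_
  | m :: _ => [m.1, m.2.1, m.2.2]

-- ===== PORT B =====
-- pat[i] on the 3-tuple, only reached under the guard 0 ≤ i < 3 (exact there)
def pvPatGet (pat : String × String × String) (i : Int) : String :=
  if i == 0 then pat.1 else if i == 1 then pat.2.1 else pat.2.2

-- _is_subseq3: greedy left-to-right pointer scan
def pvIsSubseq3 (pat : String × String × String) (seq : List String) : Bool :=
  seq.foldl (fun i w => if i < 3 ∧ w = pvPatGet pat i then i + 1 else i) (0 : Int) == 3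

def analyze_website_pattern_alt (username : List String) (timestamp : List Int) (website : List String) : List String :=
  let events := PySem.List.sorted (timestamp.zip (username.zip website))
      (fun e => toLex (e.1, toLex (e.2.1, e.2.2)))
  let visits : PySem.Dict String (List String) := events.foldl
      (fun d e => d.modify e.2.1 [] (fun l => l ++ [e.2.2])) PySem.Dict.empty
  let seqs := visits.values
  let sites := PySem.List.sorted (PySem.Set.ofList (events.map (fun e => e.2.2))) (fun x => x)
  let r := sites.foldl (fun b a =>
      sites.foldl (fun b b2 =>
        sites.foldl (fun b c =>
          let cnt := seqs.foldl (fun n s => if pvIsSubseq3 (a, b2, c) s then n + 1 else n) (0 : Int)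
          if b.2 < cnt then (some (a, b2, c), cnt) else b) b) b)
      ((none, 0) : Option (String × String × String) × Int)
  match r.1 with
  | none => []   -- Python raises TypeError (list(None)) here; excluded by Pre_
  | some p => [p.1, p.2.1, p.2.2]

-- ===== PRECONDITION & SPEC =====
-- Pre_ excludes exactly the inputs on which Python A raises IndexError: those where no user has
-- at least 3 zipped visits, so the count dict is empty and sorted(...)[0] fails.
def Pre_analyze_website_pattern (username : List String) (timestamp : List Int) (website : List String) : Prop :=
  ((username.take (min timestamp.length (min username.length website.length))).any
    (fun u => decide (3 ≤ (username.take (min timestamp.length (min username.length website.length))).count u))) = true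
instance (username : List String) (timestamp : List Int) (website : List String) : Decidable (Pre_analyze_website_pattern username timestamp website) := by unfold Pre_analyze_website_pattern; infer_instance

def pvWitness_analyze_website_pattern : List String × List Int × List String :=
  (["u", "u", "u"], [1, 2, 3], ["a", "b", "c"])

def Spec_analyze_website_pattern (username : List String) (timestamp : List Int) (website : List String) (out : List String) : Prop := out = analyze_website_pattern_alt username timestamp website
instance (username : List String) (timestamp : List Int) (website : List String) (out : List String) : Decidable (Spec_analyze_website_pattern username timestamp website out) := by unfold Spec_analyze_website_pattern; infer_instance

-- ===== CLAIM (what is proved, stated in full; the proofs are below) =====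
def Claim_equal_analyze_website_pattern : Prop := ∀ (username : List String) (timestamp : List Int) (website : List String), Dom_analyze_website_pattern username timestamp website → Pre_analyze_website_pattern username timestamp website → Spec_analyze_website_pattern username timestamp website (analyze_website_pattern username timestamp website)

-- ===== LEMMAS AND PROOFS =====

def pvKey3 (t : String × String × String) : Lex (String × Lex (String × String)) :=
  toLex (t.1, toLex (t.2.1, t.2.2))

def pvPatList (t : String × String × String) : List String := [t.1, t.2.1, t.2.2]

def pvTripleSet (s : List String) : PySem.Set (String × String × String) :=
  PySem.Set.ofList ((PySem.List.combinations s 3).map pvToTriple)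

def pvCountDict (seqs : List (List String)) : PySem.Dict (String × String × String) Int :=
  seqs.foldl (fun d websites => (pvTripleSet websites).foldl (fun d ts => d.modify ts 0 (· + 1)) d)
    PySem.Dict.empty

def pvF (seqs : List (List String)) (t : String × String × String) : Int :=
  seqs.foldl (fun n s => if pvIsSubseq3 t s then n + 1 else n) (0 : Int)

def pvCnt (seqs : List (List String)) (t : String × String × String) : Int :=
  (seqs.countP (fun s => decide (t ∈ pvTripleSet s)) : Int)

def pvStep (f : String × String × String → Int)
    (b : Option (String × String × String) × Int) (t : String × String × String) :
    Option (String × String × String) × Int :=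
  if b.2 < f t then (some t, f t) else b

def pvCube (sites : List String) : List (String × String × String) :=
  sites.flatMap (fun a => sites.flatMap (fun b => sites.map (fun c => (a, b, c))))

-- greedy matcher correctness --------------------------------------------------

lemma pv_sublist_cons_of_ne {p w : String} {l s : List String}
    (h : (p :: l).Sublist (w :: s)) (hne : p ≠ w) : (p :: l).Sublist s := by
  cases h with
  | cons _ h => exact h
  | cons₂ => exact absurd rfl hne

lemma pv_isSubseq_aux (t : String × String × String) :
    ∀ (s : List String) (i : Int), 0 ≤ i → i ≤ 3 →
      (((s.foldl (fun i w => if i < 3 ∧ w = pvPatGet t i then i + 1 else i) i) == 3) = true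
        ↔ ((pvPatList t).drop i.toNat).Sublist s) := by
  intro s
  induction s with
  | nil =>
    intro i h0 h3
    interval_cases i <;> simp [pvPatList]
  | cons w s ih =>
    intro i h0 h3
    interval_cases i
    · simp only [List.foldl_cons]
      by_cases hw : w = pvPatGet t 0
      · rw [if_pos (show (0:Int) < 3 ∧ w = pvPatGet t 0 from ⟨by norm_num, hw⟩),
          show ((0:Int) + 1) = 1 by norm_num, ih 1 (by norm_num) (by norm_num)]
        have hw' : w = t.1 := by simpa [pvPatGet] using hw
        subst hw'
        simp [pvPatList, List.cons_sublist_cons]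
      · rw [if_neg (fun h : (0:Int) < 3 ∧ w = pvPatGet t 0 => hw h.2),
          ih 0 (by norm_num) (by norm_num)]
        have hne : t.1 ≠ w := fun he => hw (by simp [pvPatGet, he])
        simp only [pvPatList, Int.toNat_zero, List.drop_zero]
        exact ⟨fun h => h.cons _, fun h => pv_sublist_cons_of_ne h hne⟩
    · simp only [List.foldl_cons]
      by_cases hw : w = pvPatGet t 1
      · rw [if_pos (show (1:Int) < 3 ∧ w = pvPatGet t 1 from ⟨by norm_num, hw⟩),
          show ((1:Int) + 1) = 2 by norm_num, ih 2 (by norm_num) (by norm_num)]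
        have hw' : w = t.2.1 := by simpa [pvPatGet] using hw
        subst hw'
        simp [pvPatList, List.cons_sublist_cons]
      · rw [if_neg (fun h : (1:Int) < 3 ∧ w = pvPatGet t 1 => hw h.2),
          ih 1 (by norm_num) (by norm_num)]
        have hne : t.2.1 ≠ w := fun he => hw (by simp [pvPatGet, he])
        simp only [pvPatList, show ((1:Int).toNat) = 1 from rfl, List.drop_succ_cons, List.drop_zero]
        exact ⟨fun h => h.cons _, fun h => pv_sublist_cons_of_ne h hne⟩
    · simp only [List.foldl_cons]
      by_cases hw : w = pvPatGet t 2
      · rw [if_pos (show (2:Int) < 3 ∧ w = pvPatGet t 2 from ⟨by norm_num, hw⟩),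
          show ((2:Int) + 1) = 3 by norm_num, ih 3 (by norm_num) (by norm_num)]
        have hw' : w = t.2.2 := by simpa [pvPatGet] using hw
        subst hw'
        simp [pvPatList, List.cons_sublist_cons]
      · rw [if_neg (fun h : (2:Int) < 3 ∧ w = pvPatGet t 2 => hw h.2),
          ih 2 (by norm_num) (by norm_num)]
        have hne : t.2.2 ≠ w := fun he => hw (by simp [pvPatGet, he])
        simp only [pvPatList, show ((2:Int).toNat) = 2 from rfl, List.drop_succ_cons, List.drop_zero]
        exact ⟨fun h => h.cons _, fun h => pv_sublist_cons_of_ne h hne⟩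
    · simp only [List.foldl_cons]
      rw [if_neg (fun h : (3:Int) < 3 ∧ w = pvPatGet t 3 => absurd h.1 (by norm_num)),
        ih 3 (by norm_num) (by norm_num)]
      simp [pvPatList]

lemma pv_isSubseq_iff (t : String × String × String) (s : List String) :
    pvIsSubseq3 t s = true ↔ t ∈ pvTripleSet s := by
  rw [pvIsSubseq3, pv_isSubseq_aux t s 0 le_rfl (by norm_num)]
  simp only [Int.toNat_zero, List.drop_zero]
  unfold pvTripleSet
  rw [PySem.Set.mem_ofList]
  constructor
  · intro h
    exact List.mem_map.mpr ⟨pvPatList t,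
      (PySem.List.mem_combinations_iff _ _ _).mpr ⟨h, rfl⟩, rfl⟩
  · intro hm
    obtain ⟨c, hc, hct⟩ := List.mem_map.mp hm
    obtain ⟨hsub, hlen⟩ := (PySem.List.mem_combinations_iff _ _ _).mp hc
    match c, hlen, hsub, hct with
    | [x, y, z], _, hsub, hct =>
      cases hct
      simpa [pvPatList] using hsub

lemma pv_triple_comp {t : String × String × String} {s : List String}
    (h : t ∈ pvTripleSet s) : t.1 ∈ s ∧ t.2.1 ∈ s ∧ t.2.2 ∈ s := by
  unfold pvTripleSet at h
  rw [PySem.Set.mem_ofList] at h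
  obtain ⟨c, hc, hct⟩ := List.mem_map.mp h
  obtain ⟨hsub, hlen⟩ := (PySem.List.mem_combinations_iff _ _ _).mp hc
  match c, hlen, hsub, hct with
  | [x, y, z], _, hsub, hct =>
    cases hct
    exact ⟨hsub.subset (by simp [pvToTriple]), hsub.subset (by simp [pvToTriple]),
      hsub.subset (by simp [pvToTriple])⟩

-- A's count dict ---------------------------------------------------------------

lemma pv_getD_countdict_aux (seqs : List (List String)) :
    ∀ (d : PySem.Dict (String × String × String) Int) (t : String × String × String),
      (seqs.foldl (fun d websites => (pvTripleSet websites).foldl (fun d ts => d.modify ts 0 (· + 1)) d) d).getD t 0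
        = d.getD t 0 + pvCnt seqs t := by
  induction seqs with
  | nil => intro d t; simp [pvCnt]
  | cons s rest ih =>
    intro d t
    rw [List.foldl_cons, ih, PySem.Dict.getD_foldl_modify_add_one]
    by_cases hm : t ∈ pvTripleSet s
    · have hnd : (pvTripleSet s).Nodup := PySem.Set.nodup_ofList _
      rw [List.count_eq_one_of_mem hnd hm]
      simp only [pvCnt, List.countP_cons, hm, decide_true]
      push_cast
      omega
    · rw [List.count_eq_zero_of_not_mem hm]
      simp only [pvCnt, List.countP_cons, hm, decide_false]
      push_cast
      omega

lemma pv_getD_countdict (seqs : List (List String)) (t : String × String × String) :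
    (pvCountDict seqs).getD t 0 = pvCnt seqs t := by
  rw [pvCountDict, pv_getD_countdict_aux, PySem.Dict.getD_empty, zero_add]

lemma pv_keys_inner (l : List (String × String × String)) :
    ∀ (d : PySem.Dict (String × String × String) Int) (t : String × String × String),
      (t ∈ (l.foldl (fun d ts => d.modify ts 0 (· + 1)) d).keys ↔ t ∈ d.keys ∨ t ∈ l) := by
  induction l with
  | nil => intro d t; simp
  | cons x rest ih =>
    intro d t
    rw [List.foldl_cons, ih]
    unfold PySem.Dict.modify
    rw [PySem.Dict.mem_keys_insert]
    simp only [List.mem_cons]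
    tauto

lemma pv_keys_countdict_aux (seqs : List (List String)) :
    ∀ (d : PySem.Dict (String × String × String) Int) (t : String × String × String),
      (t ∈ (seqs.foldl (fun d websites => (pvTripleSet websites).foldl (fun d ts => d.modify ts 0 (· + 1)) d) d).keys
        ↔ t ∈ d.keys ∨ ∃ s ∈ seqs, t ∈ pvTripleSet s) := by
  induction seqs with
  | nil => intro d t; simp
  | cons s rest ih =>
    intro d t
    rw [List.foldl_cons, ih, pv_keys_inner]
    simp only [List.mem_cons]
    constructor
    · rintro ((h | h) | ⟨s', hs', ht⟩)
      · exact Or.inl h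
      · exact Or.inr ⟨s, Or.inl rfl, h⟩
      · exact Or.inr ⟨s', Or.inr hs', ht⟩
    · rintro (h | ⟨s', (rfl | hs'), ht⟩)
      · exact Or.inl (Or.inl h)
      · exact Or.inl (Or.inr ht)
      · exact Or.inr ⟨s', hs', ht⟩

lemma pv_mem_keys_countdict (seqs : List (List String)) (t : String × String × String) :
    t ∈ (pvCountDict seqs).keys ↔ 0 < pvCnt seqs t := by
  rw [pvCountDict, pv_keys_countdict_aux, PySem.Dict.keys_empty]
  simp only [List.not_mem_nil, false_or, pvCnt]
  rw [show ((0:Int) < (List.countP (fun s => decide (t ∈ pvTripleSet s)) seqs : Int)) ↔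
      0 < List.countP (fun s => decide (t ∈ pvTripleSet s)) seqs by omega]
  rw [List.countP_pos_iff]
  simp

-- B's per-candidate count equals A's tally ------------------------------------

lemma pv_f_eq_cnt (seqs : List (List String)) (t : String × String × String) :
    pvF seqs t = pvCnt seqs t := by
  rw [pvF, PySem.List.foldl_count_if (fun s => pvIsSubseq3 t s) seqs 0, zero_add, pvCnt]
  congr 1
  apply List.countP_congr
  intro s _
  simp [pv_isSubseq_iff]

-- websites coverage ------------------------------------------------------------

lemma pv_getD_values {d : PySem.Dict String (List String)} (k : String) :
    d.getD k [] = [] ∨ d.getD k [] ∈ d.values := by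
  rcases h : d.get? k with _ | l
  · left; simp [PySem.Dict.getD, h]
  · right
    have := PySem.Dict.mem_items_of_get?_eq_some d h
    simp only [PySem.Dict.getD, h, Option.getD_some]
    exact List.mem_map.mpr ⟨(k, l), this, rfl⟩

lemma pv_visits_mem (P : String → Prop) (events : List (Int × String × String)) :
    ∀ (d : PySem.Dict String (List String)),
      (∀ v ∈ d.values, ∀ x ∈ v, P x) → (∀ e ∈ events, P e.2.2) →
      ∀ v ∈ (events.foldl (fun d e => d.modify e.2.1 [] (fun l => l ++ [e.2.2])) d).values,
        ∀ x ∈ v, P x := by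
  induction events with
  | nil => intro d hd _; exact hd
  | cons e rest ih =>
    intro d hd hev
    rw [List.foldl_cons]
    apply ih
    · intro v hv x hx
      have hnew : ∀ y ∈ d.getD e.2.1 [] ++ [e.2.2], P y := by
        intro y hy
        rcases List.mem_append.mp hy with h | h
        · rcases pv_getD_values (d := d) e.2.1 with hg | hg
          · rw [hg] at h; simp at h
          · exact hd _ hg y h
        · rw [List.mem_singleton.mp h]
          exact hev e (List.mem_cons_self ..)
      simp only [PySem.Dict.modify, PySem.Dict.insert] at hv
      by_cases hc : d.contains e.2.1 = true
      · rw [if_pos hc, PySem.Dict.values_mk] at hv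
        obtain ⟨p, hp, hpv⟩ := List.mem_map.mp hv
        obtain ⟨q, hq, hqp⟩ := List.mem_map.mp hp
        by_cases hqk : (q.1 == e.2.1) = true
        · rw [if_pos hqk] at hqp
          apply hnew
          rw [← hpv, ← hqp] at hx
          exact hx
        · rw [if_neg hqk] at hqp
          refine hd q.2 (List.mem_map.mpr ⟨q, hq, rfl⟩) x ?_
          rw [← hpv, ← hqp] at hx
          exact hx
      · rw [if_neg hc, PySem.Dict.values_mk] at hv
        simp only [List.map_append, List.map_cons, List.map_nil] at hv
        rcases List.mem_append.mp hv with h | h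
        · exact hd v (by simpa [PySem.Dict.values] using h) x hx
        · rw [List.mem_singleton.mp h] at hx
          exact hnew x hx
    · intro e' he'
      exact hev e' (List.mem_cons_of_mem _ he')

-- the selection fold -----------------------------------------------------------

lemma pv_fold_noupdate (f : String × String × String → Int) :
    ∀ (L : List (String × String × String)) (b : Option (String × String × String) × Int),
      (∀ t ∈ L, f t ≤ b.2) → L.foldl (pvStep f) b = b := by
  intro L
  induction L with
  | nil => intro b _; rfl
  | cons x rest ih =>
    intro b h
    rw [List.foldl_cons, pvStep, if_neg (not_lt.mpr (h x (List.mem_cons_self ..)))]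
    exact ih b (fun t ht => h t (List.mem_cons_of_mem _ ht))

lemma pv_fold_argmax (f : String × String × String → Int) :
    ∀ (L : List (String × String × String)),
      L.Pairwise (fun x y => pvKey3 x < pvKey3 y) →
      ∀ m ∈ L, (∀ x ∈ L, f x ≤ f m) → (∀ x ∈ L, f x = f m → pvKey3 m ≤ pvKey3 x) →
      ∀ b : Option (String × String × String) × Int, b.2 < f m →
        L.foldl (pvStep f) b = (some m, f m) := by
  intro L
  induction L with
  | nil => intro _ m hm; exact absurd hm (List.not_mem_nil)
  | cons x rest ih =>
    intro hp m hm hle hlex b hb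
    rw [List.foldl_cons]
    rcases List.mem_cons.mp hm with rfl | hm'
    · rw [pvStep, if_pos hb]
      exact pv_fold_noupdate f rest (some m, f m)
        (fun t ht => hle t (List.mem_cons_of_mem _ ht))
    · have hxm : pvKey3 x < pvKey3 m := (List.pairwise_cons.mp hp).1 m hm'
      have hfx : f x < f m := by
        rcases lt_or_eq_of_le (hle x (List.mem_cons_self ..)) with h | h
        · exact h
        · exact absurd (hlex x (List.mem_cons_self ..) h) (not_le.mpr hxm)
      have hstep : (pvStep f b x).2 < f m := by
        rw [pvStep]; split_ifs with h
        · exact hfx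
        · exact hb
      exact ih (List.pairwise_cons.mp hp).2 m hm'
        (fun t ht => hle t (List.mem_cons_of_mem _ ht))
        (fun t ht => hlex t (List.mem_cons_of_mem _ ht)) _ hstep

lemma pv_mem_cube {sites : List String} {x : String × String × String} :
    x ∈ pvCube sites ↔ x.1 ∈ sites ∧ x.2.1 ∈ sites ∧ x.2.2 ∈ sites := by
  unfold pvCube
  simp only [List.mem_flatMap, List.mem_map]
  constructor
  · rintro ⟨a, ha, b, hb, c, hc, rfl⟩
    exact ⟨ha, hb, hc⟩
  · rintro ⟨h1, h2, h3⟩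
    exact ⟨x.1, h1, x.2.1, h2, x.2.2, h3, rfl⟩

lemma pv_cube_pairwise {sites : List String} (h : sites.Pairwise (· < ·)) :
    (pvCube sites).Pairwise (fun x y => pvKey3 x < pvKey3 y) := by
  unfold pvCube
  rw [List.pairwise_flatMap]
  constructor
  · intro a _
    rw [List.pairwise_flatMap]
    constructor
    · intro b _
      rw [List.pairwise_map]
      exact h.imp (fun hcc => by simp [pvKey3, Prod.Lex.lt_iff, hcc])
    · refine h.imp ?_
      intro b1 b2 hlt x hx y hy
      obtain ⟨c1, _, rfl⟩ := List.mem_map.mp hx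
      obtain ⟨c2, _, rfl⟩ := List.mem_map.mp hy
      simp [pvKey3, Prod.Lex.lt_iff, hlt]
  · refine h.imp ?_
    intro a1 a2 hlt x hx y hy
    simp only [List.mem_flatMap, List.mem_map] at hx hy
    obtain ⟨b1, _, c1, _, rfl⟩ := hx
    obtain ⟨b2, _, c2, _, rfl⟩ := hy
    simp [pvKey3, Prod.Lex.lt_iff, hlt]

lemma pv_nested_eq_cube (sites : List String) (f : String × String × String → Int)
    (init : Option (String × String × String) × Int) :
    sites.foldl (fun b a => sites.foldl (fun b b2 => sites.foldl (fun b c => pvStep f b (a, b2, c)) b) b) init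
      = (pvCube sites).foldl (pvStep f) init := by
  unfold pvCube
  simp [List.foldl_flatMap, List.foldl_map]

lemma pv_cnt_nonneg (seqs : List (List String)) (t : String × String × String) :
    0 ≤ pvCnt seqs t := by
  rw [pvCnt]; positivity

-- the main selection equivalence ----------------------------------------------

lemma pv_select (seqs : List (List String)) (sites : List String)
    (hsp : sites.Pairwise (· < ·))
    (hcover : ∀ s ∈ seqs, ∀ x ∈ s, x ∈ sites) :
    (match PySem.List.sorted (pvCountDict seqs).keys
        (fun x => toLex (-((pvCountDict seqs).getD x 0), toLex (x.1, toLex (x.2.1, x.2.2)))) with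
     | [] => ([] : List String)
     | m :: _ => [m.1, m.2.1, m.2.2])
    = (match (sites.foldl (fun b a =>
          sites.foldl (fun b b2 =>
            sites.foldl (fun b c => pvStep (pvF seqs) b (a, b2, c)) b) b)
          ((none, 0) : Option (String × String × String) × Int)).1 with
       | none => []
       | some p => [p.1, p.2.1, p.2.2]) := by
  rw [pv_nested_eq_cube]
  rcases hs : PySem.List.sorted (pvCountDict seqs).keys
      (fun x => toLex (-((pvCountDict seqs).getD x 0), toLex (x.1, toLex (x.2.1, x.2.2)))) with _ | ⟨m, tl⟩
  · -- dict empty: every candidate count is 0, the running best never updates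
    have hkeys : (pvCountDict seqs).keys = [] := (PySem.List.sorted_eq_nil_iff _ _ _).mp hs
    have hzero : ∀ t, pvF seqs t ≤ 0 := by
      intro t
      rw [pv_f_eq_cnt]
      by_contra hpos
      have : t ∈ (pvCountDict seqs).keys := (pv_mem_keys_countdict seqs t).mpr (by omega)
      rw [hkeys] at this
      exact List.not_mem_nil this
    rw [pv_fold_noupdate (pvF seqs) (pvCube sites) (none, 0) (fun t _ => hzero t)]
  · have hm_mem : m ∈ (pvCountDict seqs).keys :=
      (PySem.List.sorted_perm _ _ _).subset (hs ▸ List.mem_cons_self ..)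
    have hmin := PySem.List.key_head_sorted_le _ _ hs
    have hcm : 0 < pvCnt seqs m := (pv_mem_keys_countdict seqs m).mp hm_mem
    -- minimality of m, read off componentwise
    have hmin' : ∀ y ∈ (pvCountDict seqs).keys,
        pvCnt seqs y ≤ pvCnt seqs m ∧ (pvCnt seqs y = pvCnt seqs m → pvKey3 m ≤ pvKey3 y) := by
      intro y hy
      have := hmin y hy
      rw [Prod.Lex.le_iff] at this
      simp only [ofLex_toLex] at this
      rw [pv_getD_countdict, pv_getD_countdict] at this
      rcases this with h | ⟨h1, h2⟩
      · exact ⟨by omega, fun he => absurd he (by omega)⟩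
      · exact ⟨by omega, fun _ => h2⟩
    have hm_cube : m ∈ pvCube sites := by
      obtain ⟨s, hsmem, hts⟩ := by
        have := hm_mem
        rw [pvCountDict, pv_keys_countdict_aux, PySem.Dict.keys_empty] at this
        simpa using this
      obtain ⟨h1, h2, h3⟩ := pv_triple_comp hts
      exact pv_mem_cube.mpr ⟨hcover s hsmem _ h1, hcover s hsmem _ h2, hcover s hsmem _ h3⟩
    have hle : ∀ x ∈ pvCube sites, pvF seqs x ≤ pvF seqs m := by
      intro x _
      rw [pv_f_eq_cnt, pv_f_eq_cnt]
      by_cases hpos : 0 < pvCnt seqs x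
      · exact (hmin' x ((pv_mem_keys_countdict seqs x).mpr hpos)).1
      · have := pv_cnt_nonneg seqs x
        omega
    have hlex : ∀ x ∈ pvCube sites, pvF seqs x = pvF seqs m → pvKey3 m ≤ pvKey3 x := by
      intro x _ he
      rw [pv_f_eq_cnt, pv_f_eq_cnt] at he
      have hx_mem : x ∈ (pvCountDict seqs).keys :=
        (pv_mem_keys_countdict seqs x).mpr (by omega)
      exact (hmin' x hx_mem).2 he
    rw [pv_fold_argmax (pvF seqs) (pvCube sites) (pv_cube_pairwise hsp) m hm_cube hle hlex
      (none, 0) (by rw [pv_f_eq_cnt]; exact hcm)]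

-- ===== VERDICT (by name: the statement is the Claim_ definition above) =====
theorem analyze_website_pattern_spec : Claim_equal_analyze_website_pattern := by
  intro username timestamp website _hdom _hpre
  unfold Spec_analyze_website_pattern
  unfold analyze_website_pattern analyze_website_pattern_alt
  exact pv_select _ _
    (PySem.List.sorted_ofList_pairwise_lt _)
    (pv_visits_mem _ _ _ (by simp [PySem.Dict.empty, PySem.Dict.values]) (fun e he =>
      (PySem.List.mem_sorted _ _ _ _).mpr ((PySem.Set.mem_ofList _ _).mpr
        (List.mem_map.mpr ⟨e, he, rfl⟩))))
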